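-- pv_equiv track=rewrite | github.com/ishine/icassp2022-multi-level-context-PSP | utils/dataloader.py | get_single_item
-- ===== SOURCE A (Python) =====
-- def get_single_item(samples, idx, max_length):
--     raw_text = samples[idx]
--     tokens = []
--     PW_label = [0] * max_length
--     PPH_label = [0] * max_length
--     IPH_label = [0] * max_length
--     label_mask = [0] * max_length
--
--     i = 0
--     j = 0
--     while i < len(raw_text):
--         if raw_text[i] == "#" and i + 1 < len(raw_text):
--             label = int(raw_text[i + 1])
--             if label == 1:
--                 # we get a PW label
--                 PW_label[j - 1] = 1
--             elif label == 2:
--                 # we get a PPH label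
--                 # it should be added to both PW label and PPH label
--                 PW_label[j - 1] = 1
--                 PPH_label[j - 1] = 1
--             elif label == 3:
--                 # we get a IPH label
--                 # it should be added to both PW label, PPH label and IPH label
--                 PW_label[j - 1] = 1
--                 PPH_label[j - 1] = 1
--                 IPH_label[j - 1] = 1
--             else:
--                 raise ValueError("Wrong prosody label!")
--             i += 2
--         else:
--             tokens.append(raw_text[i])
--             label_mask[j] = 1
--             i += 1
--             j += 1
--     text = "".join(tokens)
--     if len(tokens) > max_length:
--         sample_length = max_length
--     else:
--         sample_length = len(tokens)
--     return (
--         text,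
--         PW_label,
--         PPH_label,
--         IPH_label,
--         label_mask,
--         sample_length,
--     )
-- ===== SOURCE B (Python) =====
-- def get_single_item(samples, idx, max_length):
--     # Phase 1: scan once, collecting tokens and marker events (position, label).
--     raw_text = samples[idx]
--     tokens = []
--     events = []
--     i = 0
--     n = len(raw_text)
--     while i < n:
--         c = raw_text[i]
--         if c == "#" and i + 1 < n:
--             label = int(raw_text[i + 1])
--             if label not in (1, 2, 3):
--                 raise ValueError("Wrong prosody label!")
--             events.append((len(tokens) - 1, label))
--             i += 2
--         else:
--             tokens.append(c)
--             i += 1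
--     # Phase 2: materialise the arrays from the collected data.
--     PW_label = [0] * max_length
--     PPH_label = [0] * max_length
--     IPH_label = [0] * max_length
--     label_mask = [0] * max_length
--     for j in range(len(tokens)):
--         label_mask[j] = 1
--     for pos, label in events:
--         PW_label[pos] = 1
--         if label >= 2:
--             PPH_label[pos] = 1
--         if label >= 3:
--             IPH_label[pos] = 1
--     return (
--         "".join(tokens),
--         PW_label,
--         PPH_label,
--         IPH_label,
--         label_mask,
--         min(len(tokens), max_length),
--     )
-- ===== Notes on version B (the rewrite author's own statement) =====
-- stated objective: alternative
-- what changed: B parses in two phases: one scan collects the tokens and the prosody markers as (position, label) event tuples, and a second pass materialises the four label arrays from those events (cumulative writes PW/PPH/IPH from the label rank) and computes sample_length as min(len(tokens), max_length), instead of A's single loop that mutates all four preallocated arrays in place while scanning.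
import Mathlib
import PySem

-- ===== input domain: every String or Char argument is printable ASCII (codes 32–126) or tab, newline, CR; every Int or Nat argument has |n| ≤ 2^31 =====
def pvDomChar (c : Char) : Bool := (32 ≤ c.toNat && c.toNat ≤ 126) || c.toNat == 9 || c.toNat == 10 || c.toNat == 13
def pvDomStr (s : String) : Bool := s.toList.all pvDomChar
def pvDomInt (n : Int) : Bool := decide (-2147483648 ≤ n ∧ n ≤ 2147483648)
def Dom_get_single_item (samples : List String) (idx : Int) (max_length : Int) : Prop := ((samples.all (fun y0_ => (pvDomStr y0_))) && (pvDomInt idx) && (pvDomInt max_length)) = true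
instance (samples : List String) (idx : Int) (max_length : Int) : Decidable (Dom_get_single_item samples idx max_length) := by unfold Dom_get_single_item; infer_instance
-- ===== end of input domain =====

-- B re-implements A as a two-phase parser (scan collecting tokens and marker events, then build
-- the label arrays from the events); equivalence of return values is proved on Pre_ (where A returns).

-- ===== PORT A =====
-- the while loop of A: remaining characters, j, tokens, PW, PPH, IPH, label_mask
def pvGoA : List Char → Int → List Char → List Int → List Int → List Int → List Int →
    List Char × List Int × List Int × List Int × List Int
  | [], _, toks, pw, pph, iph, mask => (toks, pw, pph, iph, mask)
  | [c], j, toks, pw, pph, iph, mask => (toks ++ [c], pw, pph, iph, PySem.List.pySetD mask j 1)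
  | c1 :: c2 :: rest, j, toks, pw, pph, iph, mask =>
    if c1 = '#' then
      let label := (PySem.Int.ofStr? (String.ofList [c2])).getD 0   -- int(raw_text[i+1]); none = ValueError, outside Pre_
      if label = 1 then
        pvGoA rest j toks (PySem.List.pySetD pw (j-1) 1) pph iph mask
      else if label = 2 then
        pvGoA rest j toks (PySem.List.pySetD pw (j-1) 1) (PySem.List.pySetD pph (j-1) 1) iph mask
      else if label = 3 then
        pvGoA rest j toks (PySem.List.pySetD pw (j-1) 1) (PySem.List.pySetD pph (j-1) 1) (PySem.List.pySetD iph (j-1) 1) mask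
      else
        pvGoA rest j toks pw pph iph mask   -- Python: raise ValueError — outside Pre_
    else
      pvGoA (c2 :: rest) (j + 1) (toks ++ [c1]) pw pph iph (PySem.List.pySetD mask j 1)

def get_single_item (samples : List String) (idx : Int) (max_length : Int) :
    String × List Int × List Int × List Int × List Int × Int :=
  let raw_text := (PySem.List.pyGet? samples idx).getD ""   -- samples[idx]; none = IndexError, outside Pre_
  let z := List.replicate max_length.toNat (0 : Int)        -- [0] * max_length
  let r := pvGoA raw_text.toList 0 [] z z z z
  let text := String.ofList r.1
  let sample_length : Int := if (r.1.length : Int) > max_length then max_length else (r.1.length : Int)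
  (text, r.2.1, r.2.2.1, r.2.2.2.1, r.2.2.2.2, sample_length)

-- ===== PORT B =====
-- phase 1 of B: scan, collecting tokens and (position, label) marker events
def pvScan : List Char → List Char → List (Int × Int) → List Char × List (Int × Int)
  | [], toks, evs => (toks, evs)
  | [c], toks, evs => (toks ++ [c], evs)
  | c1 :: c2 :: rest, toks, evs =>
    if c1 = '#' then
      let label := (PySem.Int.ofStr? (String.ofList [c2])).getD 0
      if label = 1 ∨ label = 2 ∨ label = 3 then
        pvScan rest toks (evs ++ [((toks.length : Int) - 1, label)])
      else pvScan rest toks evs   -- Python: raise ValueError — outside Pre_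
    else pvScan (c2 :: rest) (toks ++ [c1]) evs

def get_single_item_alt (samples : List String) (idx : Int) (max_length : Int) :
    String × List Int × List Int × List Int × List Int × Int :=
  let raw_text := (PySem.List.pyGet? samples idx).getD ""
  let s := pvScan raw_text.toList [] []
  let z := List.replicate max_length.toNat (0 : Int)
  let mask := (PySem.List.pyRange 0 (s.1.length : Int) 1).foldl (fun m j => PySem.List.pySetD m j 1) z
  let labs := s.2.foldl
    (fun t pl => (PySem.List.pySetD t.1 pl.1 1,
                  if 2 ≤ pl.2 then PySem.List.pySetD t.2.1 pl.1 1 else t.2.1,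
                  if 3 ≤ pl.2 then PySem.List.pySetD t.2.2 pl.1 1 else t.2.2)) (z, z, z)
  (String.ofList s.1, labs.1, labs.2.1, labs.2.2, mask, min (s.1.length : Int) max_length)

-- ===== PRECONDITION & SPEC =====
-- Pre_ is exactly where A returns: idx in range (no IndexError on samples[idx]); every '#' that is
-- not the final character is followed by '1'/'2'/'3' (else int() or the label test raises ValueError);
-- the token count (length minus twice the number of markers) fits max_length, or the text is empty
-- (else label_mask[j] raises IndexError); and a marker before any token needs max_length ≥ 1
-- (else PW_label[-1] raises IndexError).
def Pre_get_single_item (samples : List String) (idx : Int) (max_length : Int) : Prop :=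
  PySem.Raise.InRange samples.length idx ∧
  (let cs := ((PySem.List.pyGet? samples idx).getD "").toList
   (∀ p ∈ cs.zip cs.tail, p.1 = '#' → p.2 = '1' ∨ p.2 = '2' ∨ p.2 = '3') ∧
   (((cs.length - 2 * (cs.count '#' - (if cs.getLast? = some '#' then 1 else 0)) : Nat) : Int) ≤ max_length ∨ cs = []) ∧
   (cs.head? = some '#' → 2 ≤ cs.length → 1 ≤ max_length))
instance (samples : List String) (idx : Int) (max_length : Int) : Decidable (Pre_get_single_item samples idx max_length) := by unfold Pre_get_single_item; infer_instance

def pvWitness_get_single_item : List String × Int × Int := (["a#1b#3"], 0, 4)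

def Spec_get_single_item (samples : List String) (idx : Int) (max_length : Int) (out : String × List Int × List Int × List Int × List Int × Int) : Prop := out = get_single_item_alt samples idx max_length
instance (samples : List String) (idx : Int) (max_length : Int) (out : String × List Int × List Int × List Int × List Int × Int) : Decidable (Spec_get_single_item samples idx max_length out) := by unfold Spec_get_single_item; infer_instance

-- ===== CLAIM (what is proved, stated in full; the proofs are below) =====
def Claim_equal_get_single_item : Prop := ∀ (samples : List String) (idx : Int) (max_length : Int), Dom_get_single_item samples idx max_length → Pre_get_single_item samples idx max_length → Spec_get_single_item samples idx max_length (get_single_item samples idx max_length)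

-- ===== LEMMAS AND PROOFS =====

-- the tokens of a scan, the marker events (starting at token count j), and k mask writes from j
def pvTks : List Char → List Char
  | [] => []
  | [c] => [c]
  | c1 :: c2 :: rest => if c1 = '#' then pvTks rest else c1 :: pvTks (c2 :: rest)

def pvEvs : List Char → Int → List (Int × Int)
  | [], _ => []
  | [_], _ => []
  | c1 :: c2 :: rest, j =>
    if c1 = '#' then
      let label := (PySem.Int.ofStr? (String.ofList [c2])).getD 0
      if label = 1 ∨ label = 2 ∨ label = 3 then (j - 1, label) :: pvEvs rest j
      else pvEvs rest j
    else pvEvs (c2 :: rest) (j + 1)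

def pvMaskFrom : Int → Nat → List Int → List Int
  | _, 0, m => m
  | j, k + 1, m => pvMaskFrom (j + 1) k (PySem.List.pySetD m j 1)

theorem pvScan_eq (cs : List Char) : ∀ (toks : List Char) (evs : List (Int × Int)),
    pvScan cs toks evs = (toks ++ pvTks cs, evs ++ pvEvs cs (toks.length : Int)) := by
  induction cs using pvTks.induct with
  | case1 => intro toks evs; simp [pvScan, pvTks, pvEvs]
  | case2 c => intro toks evs; simp [pvScan, pvTks, pvEvs]
  | case3 c2 rest ih =>
    intro toks evs
    simp only [pvScan, pvTks, pvEvs, reduceIte]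
    split
    · rw [ih]; simp
    · rw [ih]
  | case4 c1 c2 rest h ih =>
    intro toks evs
    simp only [pvScan, pvTks, pvEvs, if_neg h]
    rw [ih]
    simp

theorem pvGoA_eq (cs : List Char) : ∀ (j : Int) (toks : List Char) (pw pph iph mask : List Int),
    pvGoA cs j toks pw pph iph mask =
      (toks ++ pvTks cs,
       ((pvEvs cs j).foldl
         (fun t pl => (PySem.List.pySetD t.1 pl.1 1,
                       if 2 ≤ pl.2 then PySem.List.pySetD t.2.1 pl.1 1 else t.2.1,
                       if 3 ≤ pl.2 then PySem.List.pySetD t.2.2 pl.1 1 else t.2.2)) (pw, pph, iph)).1,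
       ((pvEvs cs j).foldl
         (fun t pl => (PySem.List.pySetD t.1 pl.1 1,
                       if 2 ≤ pl.2 then PySem.List.pySetD t.2.1 pl.1 1 else t.2.1,
                       if 3 ≤ pl.2 then PySem.List.pySetD t.2.2 pl.1 1 else t.2.2)) (pw, pph, iph)).2.1,
       ((pvEvs cs j).foldl
         (fun t pl => (PySem.List.pySetD t.1 pl.1 1,
                       if 2 ≤ pl.2 then PySem.List.pySetD t.2.1 pl.1 1 else t.2.1,
                       if 3 ≤ pl.2 then PySem.List.pySetD t.2.2 pl.1 1 else t.2.2)) (pw, pph, iph)).2.2,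
       pvMaskFrom j (pvTks cs).length mask) := by
  induction cs using pvTks.induct with
  | case1 => intro j toks pw pph iph mask; simp [pvGoA, pvTks, pvEvs, pvMaskFrom]
  | case2 c => intro j toks pw pph iph mask; simp [pvGoA, pvTks, pvEvs, pvMaskFrom]
  | case3 c2 rest ih =>
    intro j toks pw pph iph mask
    by_cases h1 : (PySem.Int.ofStr? (String.ofList [c2])).getD 0 = 1
    · simp only [pvGoA, pvTks, pvEvs, h1, reduceIte]
      norm_num
      exact ih _ _ _ _ _ _
    · by_cases h2 : (PySem.Int.ofStr? (String.ofList [c2])).getD 0 = 2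
      · simp only [pvGoA, pvTks, pvEvs, h2, reduceIte]
        norm_num
        exact ih _ _ _ _ _ _
      · by_cases h3 : (PySem.Int.ofStr? (String.ofList [c2])).getD 0 = 3
        · simp only [pvGoA, pvTks, pvEvs, h3, reduceIte]
          norm_num
          exact ih _ _ _ _ _ _
        · have hor : ¬((PySem.Int.ofStr? (String.ofList [c2])).getD 0 = 1 ∨
              (PySem.Int.ofStr? (String.ofList [c2])).getD 0 = 2 ∨
              (PySem.Int.ofStr? (String.ofList [c2])).getD 0 = 3) := by
            push Not
            exact ⟨h1, h2, h3⟩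
          simp only [pvGoA, pvTks, pvEvs, if_neg h1, if_neg h2, if_neg h3, if_neg hor]
          exact ih _ _ _ _ _ _
  | case4 c1 c2 rest h ih =>
    intro j toks pw pph iph mask
    simp only [pvGoA, pvTks, pvEvs, if_neg h]
    rw [ih]
    simp [pvMaskFrom]

theorem pvMask_eq (k : Nat) : ∀ (j : Int) (m : List Int),
    (PySem.List.pyRange j (j + (k : Int)) 1).foldl (fun m i => PySem.List.pySetD m i 1) m =
      pvMaskFrom j k m := by
  induction k with
  | zero => intro j m; simp [PySem.List.pyRange_one_eq_nil, pvMaskFrom]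
  | succ k ih =>
    intro j m
    rw [PySem.List.pyRange_one_cons (by omega : j < j + ((k + 1 : Nat) : Int))]
    simp only [List.foldl_cons, pvMaskFrom]
    have : j + ((k + 1 : Nat) : Int) = (j + 1) + (k : Int) := by push_cast; ring
    rw [this, ih]

-- ===== VERDICT (by name: the statement is the Claim_ definition above) =====
theorem get_single_item_spec : Claim_equal_get_single_item := by
  intro samples idx max_length _ _
  unfold Spec_get_single_item get_single_item get_single_item_alt
  simp only [pvScan_eq, pvGoA_eq, List.nil_append, List.length_nil, Nat.cast_zero]
  have hmask := pvMask_eq (pvTks ((PySem.List.pyGet? samples idx).getD "").toList).length 0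
      (List.replicate max_length.toNat (0 : Int))
  rw [zero_add] at hmask
  rw [← hmask, Int.min_def]
  have : ((if ((pvTks ((PySem.List.pyGet? samples idx).getD "").toList).length : Int) > max_length
      then max_length else ((pvTks ((PySem.List.pyGet? samples idx).getD "").toList).length : Int)) =
      (if ((pvTks ((PySem.List.pyGet? samples idx).getD "").toList).length : Int) ≤ max_length
      then ((pvTks ((PySem.List.pyGet? samples idx).getD "").toList).length : Int) else max_length)) := by
    split_ifs <;> omega
  rw [this]
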